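-- pv_equiv track=rewrite | github.com/Azuma413/grpo_test | shogi_utils.py | sfen_to_markdown
-- ===== SOURCE A (Python) =====
-- def sfen_to_markdown(sfen: str) -> str:
--     """
--     SFEN形式の局面をマークダウン形式に変換
--     Args:
--         sfen: SFEN形式の局面文字列
--     Returns:
--         str: マークダウン形式の盤面文字列
--     """
--     if sfen == "startpos":
--         return create_initial_board()
--
--     # SFENの解析
--     parts = sfen.split()
--     if parts[0] == "sfen":
--         board = parts[1]
--         hand = parts[3]
--     else:
--         board = sfen.split()[0]
--         hand = "-"
--
--     # 駒の変換マップ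
--     piece_map = {
--         'P': '歩', 'L': '香', 'N': '桂', 'S': '銀',
--         'G': '金', 'B': '角', 'R': '飛', 'K': '玉',
--         '+P': 'と', '+L': '成香', '+N': '成桂', '+S': '成銀',
--         '+B': '馬', '+R': '龍'
--     }
--
--     # 盤面の変換
--     rows = board.split('/')
--     markdown = ["| 9 | 8 | 7 | 6 | 5 | 4 | 3 | 2 | 1 |",
--                 "|---|---|---|---|---|---|---|---|---|"]
--
--     for row in rows:
--         md_row = ["|"]
--         i = 0
--         while i < len(row):
--             if row[i].isdigit():
--                 md_row.extend(["　 |"] * int(row[i]))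
--                 i += 1
--             else:
--                 if i + 1 < len(row) and row[i+1] == '+':
--                     piece = piece_map.get(row[i:i+2], '　')
--                     i += 2
--                 else:
--                     piece = piece_map.get(row[i], '　')
--                     i += 1
--                 md_row.append(f" {piece} |")
--         markdown.append("".join(md_row))
--
--     # 持ち駒の変換
--     if hand == "-":
--         markdown.append("\n持ち駒：なし")
--     else:
--         hand_pieces = []
--         i = 0
--         while i < len(hand):
--             if hand[i].isdigit():
--                 count = int(hand[i])
--                 piece = piece_map.get(hand[i+1].upper(), '')
--                 hand_pieces.extend([piece] * count)
--                 i += 2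
--             else:
--                 piece = piece_map.get(hand[i].upper(), '')
--                 hand_pieces.append(piece)
--                 i += 1
--         markdown.append(f"\n持ち駒：{'　'.join(hand_pieces)}")
--
--     return "\n".join(markdown)
--
-- def create_initial_board() -> str:
--     """初期局面のマークダウン文字列を生成"""
--     return """| 9 | 8 | 7 | 6 | 5 | 4 | 3 | 2 | 1 |
-- |---|---|---|---|---|---|---|---|---|
-- | 香 | 桂 | 銀 | 金 | 玉 | 金 | 銀 | 桂 | 香 |
-- | 　 | 飛 | 　 | 　 | 　 | 　 | 　 | 角 | 　 |
-- | 歩 | 歩 | 歩 | 歩 | 歩 | 歩 | 歩 | 歩 | 歩 |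
-- | 　 | 　 | 　 | 　 | 　 | 　 | 　 | 　 | 　 |
-- | 　 | 　 | 　 | 　 | 　 | 　 | 　 | 　 | 　 |
-- | 　 | 　 | 　 | 　 | 　 | 　 | 　 | 　 | 　 |
-- | 歩 | 歩 | 歩 | 歩 | 歩 | 歩 | 歩 | 歩 | 歩 |
-- | 　 | 角 | 　 | 　 | 　 | 　 | 　 | 飛 | 　 |
-- | 香 | 桂 | 銀 | 金 | 玉 | 金 | 銀 | 桂 | 香 |
--
-- 持ち駒：なし"""
-- ===== SOURCE B (Python) =====
-- import re
--
-- def create_initial_board() -> str: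
--     """初期局面のマークダウン文字列を生成"""
--     return """| 9 | 8 | 7 | 6 | 5 | 4 | 3 | 2 | 1 |
-- |---|---|---|---|---|---|---|---|---|
-- | 香 | 桂 | 銀 | 金 | 玉 | 金 | 銀 | 桂 | 香 |
-- | 　 | 飛 | 　 | 　 | 　 | 　 | 　 | 角 | 　 |
-- | 歩 | 歩 | 歩 | 歩 | 歩 | 歩 | 歩 | 歩 | 歩 |
-- | 　 | 　 | 　 | 　 | 　 | 　 | 　 | 　 | 　 |
-- | 　 | 　 | 　 | 　 | 　 | 　 | 　 | 　 | 　 |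
-- | 　 | 　 | 　 | 　 | 　 | 　 | 　 | 　 | 　 |
-- | 歩 | 歩 | 歩 | 歩 | 歩 | 歩 | 歩 | 歩 | 歩 |
-- | 　 | 角 | 　 | 　 | 　 | 　 | 　 | 飛 | 　 |
-- | 香 | 桂 | 銀 | 金 | 玉 | 金 | 銀 | 桂 | 香 |
--
-- 持ち駒：なし"""
--
-- PIECE_MAP = {
--     'P': '歩', 'L': '香', 'N': '桂', 'S': '銀',
--     'G': '金', 'B': '角', 'R': '飛', 'K': '玉',
--     '+P': 'と', '+L': '成香', '+N': '成桂', '+S': '成銀',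
--     '+B': '馬', '+R': '龍'
-- }
--
-- def _cell(tok: str) -> str:
--     if tok.isdigit():
--         return "　 |" * int(tok)
--     return f" {PIECE_MAP.get(tok, '　')} |"
--
-- def sfen_to_markdown(sfen: str) -> str:
--     if sfen == "startpos":
--         return create_initial_board()
--     parts = sfen.split()
--     if parts[0] == "sfen":
--         board, hand = parts[1], parts[3]
--     else:
--         board, hand = parts[0], "-"
--     lines = ["| 9 | 8 | 7 | 6 | 5 | 4 | 3 | 2 | 1 |",
--              "|---|---|---|---|---|---|---|---|---|"]
--     lines += ["|" + "".join(_cell(t) for t in re.findall(r"\d|\D\+?", row))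
--               for row in board.split("/")]
--     if hand == "-":
--         lines.append("\n持ち駒：なし")
--     else:
--         pieces = []
--         for t in re.findall(r"\d.|\D", hand):
--             if t[0].isdigit():
--                 pieces += [PIECE_MAP.get(t[1].upper(), '')] * int(t[0])
--             else:
--                 pieces.append(PIECE_MAP.get(t.upper(), ''))
--         lines.append("\n持ち駒：" + "　".join(pieces))
--     return "\n".join(lines)
-- ===== Notes on version B (the rewrite author's own statement) =====
-- stated objective: idiomatic
-- what changed: A's index-cursor while-loops are replaced by regex tokenization (re.findall) of each board row and of the hand string, followed by a per-token rendering map/loop; the output is assembled with comprehensions instead of incremental appends.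
import Mathlib
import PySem

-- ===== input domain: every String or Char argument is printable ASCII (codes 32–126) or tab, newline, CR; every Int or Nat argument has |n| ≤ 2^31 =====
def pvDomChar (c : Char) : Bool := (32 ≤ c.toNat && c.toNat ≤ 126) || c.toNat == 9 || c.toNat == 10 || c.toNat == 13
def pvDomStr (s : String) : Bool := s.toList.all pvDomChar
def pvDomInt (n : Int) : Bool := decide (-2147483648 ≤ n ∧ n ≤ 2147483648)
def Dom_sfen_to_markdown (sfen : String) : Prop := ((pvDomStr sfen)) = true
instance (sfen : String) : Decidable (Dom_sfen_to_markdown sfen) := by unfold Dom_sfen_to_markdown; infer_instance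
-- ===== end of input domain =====

-- B replaces A's index-cursor while-loop over each board row by regex tokenization
-- (re.findall) followed by a per-token rendering map (objective: idiomatic; same cost).

-- ===== PORT A =====

-- create_initial_board() and piece_map of A's module
def pvCreateInitialBoardA : String := "| 9 | 8 | 7 | 6 | 5 | 4 | 3 | 2 | 1 |
|---|---|---|---|---|---|---|---|---|
| 香 | 桂 | 銀 | 金 | 玉 | 金 | 銀 | 桂 | 香 |
| 　 | 飛 | 　 | 　 | 　 | 　 | 　 | 角 | 　 |
| 歩 | 歩 | 歩 | 歩 | 歩 | 歩 | 歩 | 歩 | 歩 |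
| 　 | 　 | 　 | 　 | 　 | 　 | 　 | 　 | 　 |
| 　 | 　 | 　 | 　 | 　 | 　 | 　 | 　 | 　 |
| 　 | 　 | 　 | 　 | 　 | 　 | 　 | 　 | 　 |
| 歩 | 歩 | 歩 | 歩 | 歩 | 歩 | 歩 | 歩 | 歩 |
| 　 | 角 | 　 | 　 | 　 | 　 | 　 | 飛 | 　 |
| 香 | 桂 | 銀 | 金 | 玉 | 金 | 銀 | 桂 | 香 |

持ち駒：なし"

def pvPieceMapA : PySem.Dict (List Char) (List Char) :=
  PySem.Dict.ofList
    [("P".toList, "歩".toList), ("L".toList, "香".toList), ("N".toList, "桂".toList),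
     ("S".toList, "銀".toList), ("G".toList, "金".toList), ("B".toList, "角".toList),
     ("R".toList, "飛".toList), ("K".toList, "玉".toList),
     ("+P".toList, "と".toList), ("+L".toList, "成香".toList), ("+N".toList, "成桂".toList),
     ("+S".toList, "成銀".toList), ("+B".toList, "馬".toList), ("+R".toList, "龍".toList)]


-- A's inner while-loop over a board row: the cursor advances by 1 (digit / single
-- piece) or by 2 (next char is '+'); returns the md_row cells after the leading "|".
-- int(row[i]) is PySem.Int.ofChars? [c]; it is some _ here since row[i] is a digit.
def pvRowA : List Char → List (List Char)
  | [] => []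
  | c :: rest =>
    if PySem.Chars.isdigit c then
      List.replicate ((PySem.Int.ofChars? [c]).getD 0).toNat "　 |".toList ++ pvRowA rest
    else if PySem.List.pyGet? rest 0 = some '+' then
      (' ' :: (PySem.Dict.getD pvPieceMapA [c, '+'] "　".toList ++ " |".toList)) :: pvRowA rest.tail
    else
      (' ' :: (PySem.Dict.getD pvPieceMapA [c] "　".toList ++ " |".toList)) :: pvRowA rest
  termination_by cs => cs.length
  decreasing_by all_goals (simp [List.length_tail]; try omega)

-- A's hand while-loop; none = the IndexError on hand[i+1] when a digit ends the string
def pvHandA : List Char → Option (List (List Char))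
  | [] => some []
  | c :: rest =>
    if PySem.Chars.isdigit c then
      match rest with
      | [] => none
      | d :: rest2 =>
        (pvHandA rest2).map (fun tl =>
          List.replicate ((PySem.Int.ofChars? [c]).getD 0).toNat
            (PySem.Dict.getD pvPieceMapA (PySem.Chars.upper [d]) []) ++ tl)
    else
      (pvHandA rest).map (fun tl => PySem.Dict.getD pvPieceMapA (PySem.Chars.upper [c]) [] :: tl)

def sfen_to_markdown (sfen : String) : String :=
  if sfen.toList = "startpos".toList then pvCreateInitialBoardA
  else
    let parts := PySem.Chars.split₀ sfen.toList
    match PySem.List.pyGet? parts 0 with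
    | none => ""      -- parts[0] raises IndexError (whitespace-only sfen); excluded by Pre_
    | some p0 =>
      let bh : Option (List Char × List Char) :=
        if p0 = "sfen".toList then
          match PySem.List.pyGet? parts 1, PySem.List.pyGet? parts 3 with
          | some b, some h => some (b, h)
          | _, _ => none   -- parts[1] / parts[3] raise IndexError; excluded by Pre_
        else some (p0, ['-'])
      match bh with
      | none => ""
      | some (board, hand) =>
        let rows := PySem.Chars.splitOn board ['/']
        let markdown :=
          "| 9 | 8 | 7 | 6 | 5 | 4 | 3 | 2 | 1 |".toList
          :: "|---|---|---|---|---|---|---|---|---|".toList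
          :: rows.map (fun row => PySem.Chars.join [] ("|".toList :: pvRowA row))
        let tail : Option (List Char) :=
          if hand = ['-'] then some "\n持ち駒：なし".toList
          else (pvHandA hand).map
            (fun hp => "\n持ち駒：".toList ++ PySem.Chars.join "　".toList hp)
        match tail with
        | none => ""  -- the hand loop raises IndexError (trailing digit); excluded by Pre_
        | some t => String.ofList (PySem.Chars.join "\n".toList (markdown ++ [t]))

-- ===== PORT B =====

-- create_initial_board() and PIECE_MAP as Source B defines them
def pvCreateInitialBoardB : String := "| 9 | 8 | 7 | 6 | 5 | 4 | 3 | 2 | 1 |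
|---|---|---|---|---|---|---|---|---|
| 香 | 桂 | 銀 | 金 | 玉 | 金 | 銀 | 桂 | 香 |
| 　 | 飛 | 　 | 　 | 　 | 　 | 　 | 角 | 　 |
| 歩 | 歩 | 歩 | 歩 | 歩 | 歩 | 歩 | 歩 | 歩 |
| 　 | 　 | 　 | 　 | 　 | 　 | 　 | 　 | 　 |
| 　 | 　 | 　 | 　 | 　 | 　 | 　 | 　 | 　 |
| 　 | 　 | 　 | 　 | 　 | 　 | 　 | 　 | 　 |
| 歩 | 歩 | 歩 | 歩 | 歩 | 歩 | 歩 | 歩 | 歩 |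
| 　 | 角 | 　 | 　 | 　 | 　 | 　 | 飛 | 　 |
| 香 | 桂 | 銀 | 金 | 玉 | 金 | 銀 | 桂 | 香 |

持ち駒：なし"

def pvPieceMapB : PySem.Dict (List Char) (List Char) :=
  PySem.Dict.ofList
    [("P".toList, "歩".toList), ("L".toList, "香".toList), ("N".toList, "桂".toList),
     ("S".toList, "銀".toList), ("G".toList, "金".toList), ("B".toList, "角".toList),
     ("R".toList, "飛".toList), ("K".toList, "玉".toList),
     ("+P".toList, "と".toList), ("+L".toList, "成香".toList), ("+N".toList, "成桂".toList),
     ("+S".toList, "成銀".toList), ("+B".toList, "馬".toList), ("+R".toList, "龍".toList)]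


-- re.findall(r"\d|\D\+?", row): a digit alone, else a non-digit greedily taking a '+' after it
def pvTokensB : List Char → List (List Char)
  | [] => []
  | c :: rest =>
    if PySem.Chars.isdigit c then [c] :: pvTokensB rest
    else if PySem.List.pyGet? rest 0 = some '+' then
      [c, '+'] :: pvTokensB rest.tail
    else [c] :: pvTokensB rest
  termination_by cs => cs.length
  decreasing_by all_goals (simp [List.length_tail]; try omega)

-- _cell(tok); "　 |" * int(tok) is the flattened replicate
def pvCellB (t : List Char) : List Char :=
  if PySem.Chars.strIsdigit t then
    (List.replicate ((PySem.Int.ofChars? t).getD 0).toNat "　 |".toList).flatten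
  else ' ' :: (PySem.Dict.getD pvPieceMapB t "　".toList ++ " |".toList)

-- re.findall(r"\d.|\D", hand): a digit with the character after it, else one non-digit;
-- a lone trailing digit matches neither alternative and is skipped
def pvHandTokensB : List Char → List (List Char)
  | [] => []
  | c :: rest =>
    if PySem.Chars.isdigit c then
      match rest with
      | [] => []
      | d :: rest2 => [c, d] :: pvHandTokensB rest2
    else [c] :: pvHandTokensB rest

-- the body of B's for-loop over hand tokens (the pieces contributed by one token)
def pvHandPieceB (t : List Char) : List (List Char) :=
  if PySem.Chars.isdigit (PySem.List.pyGetD t 0 ' ') then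
    List.replicate ((PySem.Int.ofChars? [PySem.List.pyGetD t 0 ' ']).getD 0).toNat
      (PySem.Dict.getD pvPieceMapB (PySem.Chars.upper [PySem.List.pyGetD t 1 ' ']) [])
  else [PySem.Dict.getD pvPieceMapB (PySem.Chars.upper t) []]

def sfen_to_markdown_alt (sfen : String) : String :=
  if sfen.toList = "startpos".toList then pvCreateInitialBoardB
  else
    let parts := PySem.Chars.split₀ sfen.toList
    -- Source B raises IndexError where these lookups are none; those inputs are outside Pre_
    (PySem.List.pyGet? parts 0).elim "" (fun p0 =>
      ((if p0 = "sfen".toList then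
          (PySem.List.pyGet? parts 1).bind (fun b =>
            (PySem.List.pyGet? parts 3).map (fun h => (b, h)))
        else some (p0, ['-'])) : Option (List Char × List Char)).elim "" (fun bh =>
        let board := bh.1
        let hand := bh.2
        let lines :=
          ["| 9 | 8 | 7 | 6 | 5 | 4 | 3 | 2 | 1 |".toList,
           "|---|---|---|---|---|---|---|---|---|".toList]
          ++ (PySem.Chars.splitOn board ['/']).map
               (fun row => '|' :: PySem.Chars.join [] ((pvTokensB row).map pvCellB))
        let lines := lines ++
          [if hand = ['-'] then "\n持ち駒：なし".toList
           else "\n持ち駒：".toList ++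
             PySem.Chars.join "　".toList ((pvHandTokensB hand).flatMap pvHandPieceB)]
        String.ofList (PySem.Chars.join "\n".toList lines)))

-- ===== PRECONDITION & SPEC =====

-- the hand field ends in an EVEN number of trailing digits (possibly zero):
-- a closed-form shape condition on the string (checked from its tail), equivalent to
-- "A's hand cursor, which steps 2 past a digit and 1 otherwise, never runs off the end"
def pvHandOk (h : List Char) : Bool :=
  (h.reverse.takeWhile PySem.Chars.isdigit).length % 2 == 0

-- Pre_ excludes exactly the inputs on which A raises IndexError: a whitespace-only
-- sfen (parts[0]), an "sfen"-prefixed string with fewer than 4 fields (parts[3]),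
-- and a hand field ending in an odd number of digits (hand[i+1] past the end).
def Pre_sfen_to_markdown (sfen : String) : Prop :=
  sfen.toList = "startpos".toList ∨
    (PySem.Chars.split₀ sfen.toList ≠ [] ∧
      ((PySem.Chars.split₀ sfen.toList).headD [] = "sfen".toList →
        4 ≤ (PySem.Chars.split₀ sfen.toList).length ∧
        pvHandOk ((PySem.Chars.split₀ sfen.toList).getD 3 []) = true))
instance (sfen : String) : Decidable (Pre_sfen_to_markdown sfen) := by
  unfold Pre_sfen_to_markdown; infer_instance

def pvWitness_sfen_to_markdown : String := "sfen 9 b P2p 1"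

def Spec_sfen_to_markdown (sfen : String) (out : String) : Prop := out = sfen_to_markdown_alt sfen
instance (sfen : String) (out : String) : Decidable (Spec_sfen_to_markdown sfen out) := by
  unfold Spec_sfen_to_markdown; infer_instance

-- ===== CLAIM (what is proved, stated in full; the proofs are below) =====
def Claim_equal_sfen_to_markdown : Prop := ∀ (sfen : String), Dom_sfen_to_markdown sfen → Pre_sfen_to_markdown sfen → Spec_sfen_to_markdown sfen (sfen_to_markdown sfen)

-- ===== LEMMAS AND PROOFS =====

-- "".join is concatenation
lemma pvJoinNil (l : List (List Char)) : PySem.Chars.join [] l = l.flatten := by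
  induction l with
  | nil => rfl
  | cons x xs ih =>
    cases xs with
    | nil => simp [PySem.Chars.join_singleton]
    | cons y ys => rw [PySem.Chars.join_cons_cons] at *; simp_all

-- Python's '+' is not a digit
lemma pvPlusNotDigit : PySem.Chars.isdigit '+' = false := by decide

-- the regex tokenizer + per-token rendering produces A's cursor-loop cells
lemma pvRow_eq (cs : List Char) :
    ((pvTokensB cs).map pvCellB).flatten = (pvRowA cs).flatten := by
  fun_induction pvTokensB cs <;>
    simp_all [pvRowA, pvCellB, PySem.Chars.strIsdigit, pvPlusNotDigit, pvPieceMapA, pvPieceMapB]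

-- transport of the trailing-digit-parity condition through the tokenizer's steps
lemma pvHandOk_cons_nondigit (c : Char) (rest : List Char)
    (h : PySem.Chars.isdigit c = false) : pvHandOk (c :: rest) = pvHandOk rest := by
  unfold pvHandOk
  rw [List.reverse_cons, List.takeWhile_append]
  split_ifs with hall
  · simp [h, hall]
  · rfl

lemma pvHandOk_cons2_digit (c d : Char) (r2 : List Char)
    (h : PySem.Chars.isdigit c = true) : pvHandOk (c :: d :: r2) = pvHandOk r2 := by
  unfold pvHandOk
  rw [List.reverse_cons, List.reverse_cons, List.append_assoc, List.takeWhile_append]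
  split_ifs with hall
  · cases hd : PySem.Chars.isdigit d
    · simp [hd, hall]
    · have h2 : ∀ n : Nat, (n + 2) % 2 = n % 2 := fun n => by omega
      simp [hd, h, hall, h2]
  · rfl

-- a single digit is a dangling digit
lemma pvHandOk_singleton_digit (c : Char) (h : PySem.Chars.isdigit c = true) :
    pvHandOk [c] = false := by
  simp [pvHandOk, h]

-- hand[i+1] of B's digit token
lemma pvGetD_one {α : Type} (a b : α) (l : List α) (x : α) :
    PySem.List.pyGetD (a :: b :: l) 1 x = b := by
  simp [pysem]

-- on a well-formed hand A's cursor loop returns, and returns B's token rendering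
lemma pvHand_eq (cs : List Char) (hok : pvHandOk cs = true) :
    pvHandA cs = some ((pvHandTokensB cs).flatMap pvHandPieceB) := by
  fun_induction pvHandTokensB cs with
  | case1 => rfl
  | case2 c h =>
      simp_all [pvHandOk_singleton_digit]
  | case3 c h d rest2 ih =>
      rw [pvHandOk_cons2_digit c d rest2 h] at hok
      simp [pvHandA, h, ih hok, pvHandPieceB, pvGetD_one, PySem.List.pyGetD_zero_cons, pvPieceMapA, pvPieceMapB]
  | case4 c rest h ih =>
      have h' : PySem.Chars.isdigit c = false := by simpa using h
      rw [pvHandOk_cons_nondigit c rest h'] at hok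
      cases rest with
      | nil => simp [pvHandA, h', pvHandPieceB, pvHandTokensB, pvPieceMapA, pvPieceMapB]
      | cons d r2 => simp [pvHandA, h', ih hok, pvHandPieceB, pvPieceMapA, pvPieceMapB]

-- ===== VERDICT (by name: the statement is the Claim_ definition above) =====
theorem sfen_to_markdown_spec : Claim_equal_sfen_to_markdown := by
  intro sfen _ hpre
  unfold Spec_sfen_to_markdown sfen_to_markdown sfen_to_markdown_alt
  by_cases hsp : sfen.toList = "startpos".toList
  · simp [hsp, pvCreateInitialBoardA, pvCreateInitialBoardB]
  · simp only [if_neg hsp]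
    have hsfen : "sfen".toList = ['s','f','e','n'] := rfl
    rcases hpre with hpre | ⟨hne, himp⟩
    · exact absurd hpre hsp
    cases hp0 : PySem.List.pyGet? (PySem.Chars.split₀ sfen.toList) 0 with
    | none => rfl
    | some p0 =>
      have hp0' : (PySem.Chars.split₀ sfen.toList).headD [] = p0 := by
        cases hps : PySem.Chars.split₀ sfen.toList with
        | nil => exact absurd hps hne
        | cons a l =>
          rw [hps] at hp0
          simpa using (by simpa [PySem.List.pyGet?_zero_cons] using hp0 : a = p0)
      by_cases hsf : p0 = "sfen".toList
      · -- "sfen"-prefixed: Pre_ gives the length bound and a well-formed hand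
        obtain ⟨hlen, hok⟩ := himp (hp0' ▸ hsf)
        have h1 : PySem.List.pyGet? (PySem.Chars.split₀ sfen.toList) 1 =
            some ((PySem.Chars.split₀ sfen.toList)[1]'(by omega)) :=
          PySem.List.pyGet?_ofNat _ 1 (by omega)
        have h3 : PySem.List.pyGet? (PySem.Chars.split₀ sfen.toList) 3 =
            some ((PySem.Chars.split₀ sfen.toList)[3]'(by omega)) :=
          PySem.List.pyGet?_ofNat _ 3 (by omega)
        have hok3 : pvHandOk ((PySem.Chars.split₀ sfen.toList)[3]'(by omega)) = true := by
          rwa [List.getD_eq_getElem?_getD, List.getElem?_eq_getElem (by omega),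
               Option.getD_some] at hok
        simp only [hsf, hsfen, h1, h3]
        by_cases hd3 : (PySem.Chars.split₀ sfen.toList)[3]'(by omega) = ['-']
        · simp [hd3, pvRow_eq, pvJoinNil]
        · simp [hd3, pvHand_eq _ hok3, pvRow_eq, pvJoinNil]
      · -- plain position string: hand is "-", only the board lemma is needed
        rw [hsfen] at hsf
        simp [hsf, pvRow_eq, pvJoinNil]
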